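-- pv_equiv track=rewrite | github.com/brett-henderson/daily_programmer | Challenge #375 [Easy] Print a new number by adding one to each of its digit/increment_digits_bonus.py | increment_digits
-- ===== SOURCE A (Python) =====
-- import math
--
-- def increment_digits(number):
--     number_new = 0
--     digits = int(math.log10(number) + 1)
--     position = 1
--
--     while digits:
--         number_tmp = (number % 10) + 1      # Grab the right most digit and increment
--         number //= 10                       # Remove it from the original number
--         number_new += number_tmp * position # Place it from right to left
--
--         # Position the digit to the left of the current number
--         if number_tmp == 10:
--             position *= 100     # 2 digits to the left
--         else:
--             position *= 10      # 1 digit to the left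
--         digits -= 1
--
--     return number_new
-- ===== SOURCE B (Python) =====
-- def increment_digits(number):
--     q, r = divmod(number, 10)
--     inc = r + 1
--     if q == 0:
--         return inc
--     return increment_digits(q) * (100 if inc == 10 else 10) + inc
-- ===== Notes on version B (the rewrite author's own statement) =====
-- stated objective: simpler
-- what changed: Replaces A's log10 digit count plus right-to-left while-loop with a positional-weight accumulator by a short top-down divmod recursion that needs no math import, no digit counter and no accumulator.
-- crash fix: On number = 0 A raises ValueError (math.log10 domain error) while B returns 1; on negative numbers A raises ValueError and B does not return either (RecursionError). — e.g. on increment_digits(0): A raises ValueError, B returns 1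
import Mathlib
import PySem

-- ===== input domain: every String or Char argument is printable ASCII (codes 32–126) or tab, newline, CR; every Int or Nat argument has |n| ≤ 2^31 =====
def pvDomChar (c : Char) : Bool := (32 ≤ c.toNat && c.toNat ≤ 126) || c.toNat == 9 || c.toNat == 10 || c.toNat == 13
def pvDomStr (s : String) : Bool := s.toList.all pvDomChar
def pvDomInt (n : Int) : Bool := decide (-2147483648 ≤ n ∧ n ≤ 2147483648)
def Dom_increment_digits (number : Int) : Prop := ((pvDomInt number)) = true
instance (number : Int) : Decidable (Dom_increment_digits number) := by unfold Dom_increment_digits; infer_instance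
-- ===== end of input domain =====

-- B replaces A's log10 digit count and right-to-left accumulator loop by a short top-down divmod recursion (objective: simpler).


-- ===== PORT A =====
-- digits = int(math.log10(number) + 1): ported as the decimal digit count of number,
-- which is exact for every number ≥ 1 in the domain |number| ≤ 2^31 (checked against CPython
-- near each power of 10); number ≤ 0 (where math.log10 raises ValueError) is outside Pre_.
def pvNumDigits (n : Int) : Nat :=
  if h : n < 10 then 1
  else pvNumDigits (PySem.Int.floordiv n 10) + 1
termination_by n.toNat
decreasing_by
  have h10 : PySem.Int.floordiv n 10 = n / 10 := PySem.Int.floordiv_eq_ediv_of_pos (by omega)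
  rw [h10]; omega

-- the while loop, iterated exactly `digits` times over (number, number_new, position)
def pvALoop : Nat → Int → Int → Int → Int
  | 0, _, number_new, _ => number_new
  | d + 1, number, number_new, position =>
    let number_tmp := PySem.Int.mod number 10 + 1
    let number' := PySem.Int.floordiv number 10
    let number_new' := number_new + number_tmp * position
    let position' := if number_tmp == 10 then position * 100 else position * 10
    pvALoop d number' number_new' position'

def increment_digits (number : Int) : Int :=
  pvALoop (pvNumDigits number) number 0 1

-- ===== PORT B =====
-- fuel makes the recursion total in Lean; number.toNat + 1 steps always suffice for number ≥ 0
-- (the Python recursion does not return on negative numbers, which are outside Pre_).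
def pvBRec : Nat → Int → Int
  | 0, _ => 0
  | fuel + 1, number =>
    let q := PySem.Int.floordiv number 10
    let r := PySem.Int.mod number 10
    let inc := r + 1
    if q == 0 then inc
    else pvBRec fuel q * (if inc == 10 then 100 else 10) + inc

def increment_digits_alt (number : Int) : Int :=
  pvBRec (number.toNat + 1) number

-- ===== PRECONDITION & SPEC =====
-- Pre_ excludes exactly number ≤ 0, where A's math.log10 raises ValueError.
def Pre_increment_digits (number : Int) : Prop := 1 ≤ number
instance (number : Int) : Decidable (Pre_increment_digits number) := by unfold Pre_increment_digits; infer_instance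
def pvWitness_increment_digits : Int := (123)

-- On number = 0 A raises ValueError (math.log10 domain error) while B returns 1.
def Raises_increment_digits (number : Int) : Prop := number = 0
instance (number : Int) : Decidable (Raises_increment_digits number) := by unfold Raises_increment_digits; infer_instance
def pvRaiseWitness_increment_digits : Int := (0)
def pvRaiseWitnessOut_increment_digits : Int := 1

def Spec_increment_digits (number : Int) (out : Int) : Prop := out = increment_digits_alt number
instance (number : Int) (out : Int) : Decidable (Spec_increment_digits number out) := by unfold Spec_increment_digits; infer_instance

-- ===== CLAIM (what is proved, stated in full; the proofs are below) =====
def Claim_equal_increment_digits : Prop := ∀ (number : Int), Dom_increment_digits number → Pre_increment_digits number → Spec_increment_digits number (increment_digits number)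
def Claim_raises_increment_digits : Prop := (∀ (number : Int), Dom_increment_digits number → Raises_increment_digits number → ¬ Pre_increment_digits number) ∧ (Dom_increment_digits (pvRaiseWitness_increment_digits) ∧ Raises_increment_digits (pvRaiseWitness_increment_digits) ∧ increment_digits_alt (pvRaiseWitness_increment_digits) = pvRaiseWitnessOut_increment_digits)

-- ===== LEMMAS AND PROOFS =====

-- B's fuel is irrelevant as long as it exceeds the (nonnegative) input.
lemma pvBRec_fuel (f₁ : Nat) : ∀ (f₂ : Nat) (n : Int), 0 ≤ n → n < f₁ → n < f₂ →
    pvBRec f₁ n = pvBRec f₂ n := by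
  induction f₁ with
  | zero => intro f₂ n h0 h1 _; exfalso; push_cast at h1; omega
  | succ g ih =>
    intro f₂ n h0 h1 h2
    obtain ⟨h, rfl⟩ : ∃ h, f₂ = h + 1 := ⟨f₂ - 1, by omega⟩
    have h10 : PySem.Int.floordiv n 10 = n / 10 := PySem.Int.floordiv_eq_ediv_of_pos (by omega)
    have hm : PySem.Int.mod n 10 = n % 10 := PySem.Int.mod_eq_emod_of_pos (by omega)
    simp only [pvBRec, h10, hm, beq_iff_eq]
    by_cases hq : n / 10 = 0
    · simp [hq]
    · simp only [hq, if_false]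
      rw [ih h (n / 10) (by omega) (by push_cast at h1 ⊢; omega) (by push_cast at h2 ⊢; omega)]

-- one-step unfolding of B for positive input
lemma alt_unfold (n : Int) (h1 : 1 ≤ n) :
    increment_digits_alt n =
      if n / 10 = 0 then n % 10 + 1
      else increment_digits_alt (n / 10) * (if n % 10 + 1 = 10 then 100 else 10) + (n % 10 + 1) := by
  have h10 : PySem.Int.floordiv n 10 = n / 10 := PySem.Int.floordiv_eq_ediv_of_pos (by omega)
  have hm : PySem.Int.mod n 10 = n % 10 := PySem.Int.mod_eq_emod_of_pos (by omega)
  rw [increment_digits_alt]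
  obtain ⟨t, ht⟩ : ∃ t, n.toNat = t + 1 := ⟨n.toNat - 1, by omega⟩
  rw [ht]
  show pvBRec (t + 1 + 1) n = _
  conv_lhs => rw [pvBRec]
  simp only [h10, hm, beq_iff_eq]
  by_cases hq : n / 10 = 0
  · simp [hq]
  · simp only [hq, if_false]
    rw [increment_digits_alt,
        pvBRec_fuel (t + 1) ((n / 10).toNat + 1) (n / 10) (by omega) (by push_cast; omega)
          (by push_cast; omega)]

lemma pvNumDigits_of_lt (n : Int) (h : n < 10) : pvNumDigits n = 1 := by
  rw [pvNumDigits]; simp [h]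

lemma pvNumDigits_of_ge (n : Int) (h : ¬ n < 10) :
    pvNumDigits n = pvNumDigits (PySem.Int.floordiv n 10) + 1 := by
  rw [pvNumDigits]; simp [h]

-- A's loop run for exactly pvNumDigits n steps computes acc + pos * B(n).
lemma pvALoop_eq (k : Nat) : ∀ (n acc pos : Int), 1 ≤ n → pvNumDigits n = k →
    pvALoop k n acc pos = acc + pos * increment_digits_alt n := by
  induction k with
  | zero =>
    intro n acc pos h1 hk
    rcases lt_or_ge n 10 with h | h
    · rw [pvNumDigits_of_lt n h] at hk; omega
    · rw [pvNumDigits_of_ge n (by omega)] at hk; omega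
  | succ k ih =>
    intro n acc pos h1 hk
    have h10 : PySem.Int.floordiv n 10 = n / 10 := PySem.Int.floordiv_eq_ediv_of_pos (by omega)
    have hm : PySem.Int.mod n 10 = n % 10 := PySem.Int.mod_eq_emod_of_pos (by omega)
    rcases lt_or_ge n 10 with h | h
    · -- one digit: both sides are acc + pos * (n + 1)
      rw [pvNumDigits_of_lt n h] at hk
      obtain rfl : k = 0 := by omega
      have hq : n / 10 = 0 := by omega
      have hr : n % 10 = n := by omega
      simp only [pvALoop, hm, hr]
      rw [alt_unfold n h1]
      simp [hq, hr]; ring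
    · -- n ≥ 10: peel the rightmost digit on both sides
      rw [pvNumDigits_of_ge n (by omega), h10] at hk
      have hq0 : ¬ n / 10 = 0 := by omega
      simp only [pvALoop, h10, hm, beq_iff_eq]
      rw [ih (n / 10) _ _ (by omega) (by omega), alt_unfold n h1]
      simp only [hq0, if_false]
      by_cases h9 : n % 10 + 1 = 10
      · simp only [h9, if_true]; ring
      · simp only [h9, if_false]; ring

-- ===== VERDICT (by name: the statement is the Claim_ definition above) =====
theorem increment_digits_spec : Claim_equal_increment_digits := by
  intro n _ hpre
  show increment_digits n = increment_digits_alt n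
  rw [increment_digits, pvALoop_eq (pvNumDigits n) n 0 1 hpre rfl]
  ring

@[simp] theorem increment_digits_raises : Claim_raises_increment_digits := by
  unfold Claim_raises_increment_digits
  refine ⟨?_, by decide⟩
  intro n _ h
  simp only [Raises_increment_digits] at h
  simp [Pre_increment_digits, h]
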